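-- pv_equiv track=rewrite | github.com/unjambonakap/prog_contest | misc/samples/test.py | count_open
-- ===== SOURCE A (Python) =====
-- def count_open(seq):
--   cnt = 0
--   no = 0
--   for c in seq:
--     if not c: no += 1
--     elif c: no -= 1
--     if no < 0: return -1
--   return no
-- ===== SOURCE B (Python) =====
-- def count_open(seq):
--   # Right-to-left scan: maintain the suffix's total contribution and the
--   # minimum prefix sum of the suffix (minpref(c::xs) = min(d, d + minpref(xs))).
--   total = 0
--   low = 0
--   for c in reversed(seq):
--     d = 1 if not c else -1
--     total += d
--     low = min(d, d + low)
--   return -1 if low < 0 else total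
-- ===== Notes on version B (the rewrite author's own statement) =====
-- stated objective: alternative
-- what changed: Replaces A's forward loop with running counter and early negative exit by a right-to-left scan that maintains the suffix total and the minimum prefix sum via the right-fold identity min(d, d+low), deciding -1 vs total only at the end.
import Mathlib
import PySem

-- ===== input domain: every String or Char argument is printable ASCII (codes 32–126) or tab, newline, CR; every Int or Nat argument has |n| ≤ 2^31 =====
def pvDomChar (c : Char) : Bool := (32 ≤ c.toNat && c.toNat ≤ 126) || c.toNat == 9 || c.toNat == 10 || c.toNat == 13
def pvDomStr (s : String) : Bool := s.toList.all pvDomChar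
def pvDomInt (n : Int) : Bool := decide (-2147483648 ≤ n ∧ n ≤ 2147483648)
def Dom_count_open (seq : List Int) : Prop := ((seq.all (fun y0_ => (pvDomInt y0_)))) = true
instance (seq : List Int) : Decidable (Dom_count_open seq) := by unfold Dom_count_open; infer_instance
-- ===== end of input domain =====

-- B replaces A's forward early-exit counter loop by a right-to-left scan keeping (total, min prefix sum); alternative decomposition, same cost.


-- ===== PORT A =====
-- A's loop: running counter `no`, +1 on falsy, -1 on truthy, early return -1 when negative.
def countOpenLoop : List Int → Int → Int
  | [], no => no
  | c :: rest, no =>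
    let no' := if c = 0 then no + 1 else no - 1
    if no' < 0 then -1 else countOpenLoop rest no'

def count_open (seq : List Int) : Int := countOpenLoop seq 0

-- ===== PORT B =====
-- Source B's reversed-loop fold: state (total, low), per element d = ±1, total += d, low := min(d, d+low)
def count_open_alt (seq : List Int) : Int :=
  let s := seq.reverse.foldl
    (fun (s : Int × Int) c =>
      let d : Int := if c = 0 then 1 else -1
      (s.1 + d, min d (d + s.2))) (0, 0)
  if s.2 < 0 then -1 else s.1

-- ===== PRECONDITION & SPEC =====
def Spec_count_open (seq : List Int) (out : Int) : Prop := out = count_open_alt seq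
instance (seq : List Int) (out : Int) : Decidable (Spec_count_open seq out) := by unfold Spec_count_open; infer_instance

-- ===== CLAIM (what is proved, stated in full; the proofs are below) =====
def Claim_equal_count_open : Prop := ∀ (seq : List Int), Dom_count_open seq → Spec_count_open seq (count_open seq)

-- ===== LEMMAS AND PROOFS =====
-- right-recursive form of B's fold state: (suffix total, min prefix sum of the suffix)
def altAux : List Int → Int × Int
  | [] => (0, 0)
  | c :: rest =>
    let s := altAux rest
    let d : Int := if c = 0 then 1 else -1
    (s.1 + d, min d (d + s.2))

theorem foldl_reverse_eq_altAux (seq : List Int) :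
    seq.reverse.foldl
      (fun (s : Int × Int) c =>
        let d : Int := if c = 0 then 1 else -1
        (s.1 + d, min d (d + s.2))) (0, 0) = altAux seq := by
  induction seq with
  | nil => rfl
  | cons c rest ih => simp [altAux, List.foldl_append, ih]

theorem countOpenLoop_eq_altAux (seq : List Int) : ∀ (no : Int), 0 ≤ no →
    countOpenLoop seq no =
      (if no + (altAux seq).2 < 0 then -1 else no + (altAux seq).1) := by
  induction seq with
  | nil => intro no h; simp [countOpenLoop, altAux]; omega
  | cons c rest ih =>
    intro no h
    simp only [countOpenLoop, altAux]
    by_cases hc : c = 0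
    · simp only [hc, if_true]
      rw [if_neg (by omega : ¬ no + 1 < 0), ih _ (by omega)]
      have hm := min_choice (1:Int) (1 + (altAux rest).2)
      have h1 := min_le_left (1:Int) (1 + (altAux rest).2)
      have h2 := min_le_right (1:Int) (1 + (altAux rest).2)
      split_ifs <;> omega
    · simp only [hc, if_false]
      have h1 := min_le_left (-1:Int) (-1 + (altAux rest).2)
      have h2 := min_le_right (-1:Int) (-1 + (altAux rest).2)
      have hm := min_choice (-1:Int) (-1 + (altAux rest).2)
      by_cases hneg : no - 1 < 0
      · rw [if_pos hneg, if_pos (by omega)]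
      · rw [if_neg hneg, ih _ (by omega)]
        split_ifs <;> omega

-- ===== VERDICT (by name: the statement is the Claim_ definition above) =====
theorem count_open_spec : Claim_equal_count_open := by
  intro seq _
  unfold Spec_count_open count_open count_open_alt
  rw [foldl_reverse_eq_altAux]
  have := countOpenLoop_eq_altAux seq 0 (le_refl 0)
  simpa using this
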